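-- pv_equiv track=rewrite | github.com/flarebyte/bubblegum-entity | scripts/parse_elm.py | replaceArrowWithinParenthesis
-- ===== SOURCE A (Python) =====
-- def replaceArrowWithinParenthesis(text):
--     r = ""
--     inParen = False
--     for letter in text:
--         if letter == "(":
--            inParen = True
--         if letter == ")":
--            inParen = False
--         if inParen and letter == "-":
--             letter = ""
--         if inParen and letter == ">":
--             letter = "@"
--         r += letter
--     return r
-- ===== SOURCE B (Python) =====
-- def replaceArrowWithinParenthesis(text):
--     out = []
--     rest = text
--     while True:
--         i = rest.find("(")
--         if i == -1:
--             out.append(rest)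
--             break
--         out.append(rest[: i + 1])
--         rest = rest[i + 1 :]
--         j = rest.find(")")
--         if j == -1:
--             out.append(_fix(rest))
--             break
--         out.append(_fix(rest[:j]))
--         out.append(")")
--         rest = rest[j + 1 :]
--     return "".join(out)
--
--
-- def _fix(seg):
--     return "".join("@" if c == ">" else c for c in seg if c != "-")
-- ===== Notes on version B (the rewrite author's own statement) =====
-- stated objective: faster
-- what changed: B scans by region: it repeatedly jumps with str.find to the next '(' and to the closing ')', transforms only that span with a comprehension, and joins the pieces at the end, instead of A's per-character inParen flag machine that rebuilds the string one letter at a time.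
import Mathlib
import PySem

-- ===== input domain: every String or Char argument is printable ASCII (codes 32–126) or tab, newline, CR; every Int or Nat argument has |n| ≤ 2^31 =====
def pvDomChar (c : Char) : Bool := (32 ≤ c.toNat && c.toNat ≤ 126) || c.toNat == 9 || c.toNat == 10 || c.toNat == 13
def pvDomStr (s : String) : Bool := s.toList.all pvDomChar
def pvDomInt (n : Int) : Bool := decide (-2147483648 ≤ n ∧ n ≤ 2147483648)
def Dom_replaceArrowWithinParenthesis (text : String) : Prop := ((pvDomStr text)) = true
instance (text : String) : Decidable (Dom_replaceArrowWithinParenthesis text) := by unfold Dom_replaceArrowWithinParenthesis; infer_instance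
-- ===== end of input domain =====

-- B replaces A's per-character inParen flag machine by a region scanner: find the next '(' and its
-- closing ')', transform only the span in between, join the pieces at the end (measured faster by
-- a constant factor: bulk find/join instead of per-character string concatenation).

-- ===== PORT A =====
def replaceArrowWithinParenthesis (text : String) : String :=
  -- r = ""; inParen = False; for letter in text: … ; r += letter
  let res := text.toList.foldl
    (fun (st : List Char × Bool) letter =>
      let inParen := if letter = '(' then true else st.2
      let inParen := if letter = ')' then false else inParen
      let app : List Char :=
        if inParen ∧ letter = '-' then []            -- letter = ""
        else if inParen ∧ letter = '>' then ['@']    -- letter = "@"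
        else [letter]
      (st.1 ++ app, inParen))
    ([], false)
  String.ofList res.1

-- ===== PORT B =====
-- _fix(seg): "".join("@" if c == ">" else c for c in seg if c != "-")
def pvFix (seg : List Char) : List Char :=
  (seg.filter (fun c => c ≠ '-')).map (fun c => if c = '>' then '@' else c)

-- the while-True loop of Source B: `out` is acc, `rest` is rest; `fuel` only bounds the iteration
-- count (fuel > rest.length suffices, the loop drops at least one character per pass)
def pvAltGo : Nat → List (List Char) → List Char → List (List Char)
  | 0, acc, rest => acc ++ [rest]
  | fuel + 1, acc, rest =>
    let i := PySem.Chars.find rest ['(']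
    if i = -1 then
      acc ++ [rest]
    else
      let acc1 := acc ++ [PySem.List.slice rest none (some (i + 1))]
      let rest1 := PySem.List.slice rest (some (i + 1)) none
      let j := PySem.Chars.find rest1 [')']
      if j = -1 then
        acc1 ++ [pvFix rest1]
      else
        pvAltGo fuel (acc1 ++ [pvFix (PySem.List.slice rest1 none (some j))] ++ [[')']])
          (PySem.List.slice rest1 (some (j + 1)) none)

def replaceArrowWithinParenthesis_alt (text : String) : String :=
  String.ofList (PySem.Chars.join [] (pvAltGo (text.toList.length + 1) [] text.toList))

-- ===== PRECONDITION & SPEC =====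
def Spec_replaceArrowWithinParenthesis (text : String) (out : String) : Prop := out = replaceArrowWithinParenthesis_alt text
instance (text : String) (out : String) : Decidable (Spec_replaceArrowWithinParenthesis text out) := by unfold Spec_replaceArrowWithinParenthesis; infer_instance

-- ===== CLAIM (what is proved, stated in full; the proofs are below) =====
def Claim_equal_replaceArrowWithinParenthesis : Prop := ∀ (text : String), Dom_replaceArrowWithinParenthesis text → Spec_replaceArrowWithinParenthesis text (replaceArrowWithinParenthesis text)

-- ===== LEMMAS AND PROOFS =====

-- reference state machine: pvProc b cs = the characters A appends, starting from flag b, on the rest cs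
def pvProc (b : Bool) : List Char → List Char
  | [] => []
  | c :: cs =>
    let b1 := if c = '(' then true else b
    let b2 := if c = ')' then false else b1
    (if b2 ∧ c = '-' then [] else if b2 ∧ c = '>' then ['@'] else [c]) ++ pvProc b2 cs

lemma pvFoldA (cs : List Char) : ∀ (r : List Char) (b : Bool),
    (cs.foldl
      (fun (st : List Char × Bool) letter =>
        let inParen := if letter = '(' then true else st.2
        let inParen := if letter = ')' then false else inParen
        let app : List Char :=
          if inParen ∧ letter = '-' then []
          else if inParen ∧ letter = '>' then ['@']
          else [letter]
        (st.1 ++ app, inParen))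
      (r, b)).1 = r ++ pvProc b cs := by
  induction cs with
  | nil => intro r b; simp [pvProc]
  | cons c cs ih =>
    intro r b
    simp only [List.foldl_cons, pvProc]
    rw [ih]
    simp [List.append_assoc]

lemma pvJoinNil (ps : List (List Char)) : PySem.Chars.join [] ps = ps.flatten := by
  induction ps with
  | nil => simp [PySem.Chars.join_nil]
  | cons a ps ih =>
    cases ps with
    | nil => simp [PySem.Chars.join_singleton]
    | cons b t => rw [PySem.Chars.join_cons_cons, ih]; simp

lemma pvProc_false_append (pre rest : List Char) (h : '(' ∉ pre) :
    pvProc false (pre ++ rest) = pre ++ pvProc false rest := by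
  induction pre with
  | nil => simp
  | cons c p ih =>
    have hc : c ≠ '(' := by intro hc; exact h (by simp [hc])
    have hp : '(' ∉ p := fun hm => h (List.mem_cons_of_mem _ hm)
    simp only [List.cons_append, pvProc, if_neg hc, ite_self]
    rw [ih hp]
    simp

lemma pvProc_true_append (seg rest : List Char) (h : ')' ∉ seg) :
    pvProc true (seg ++ rest) = pvFix seg ++ pvProc true rest := by
  induction seg with
  | nil => simp [pvFix]
  | cons c p ih =>
    have hc : c ≠ ')' := by intro hc; exact h (by simp [hc])
    have hp : ')' ∉ p := fun hm => h (List.mem_cons_of_mem _ hm)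
    simp only [List.cons_append, pvProc, if_neg hc, ite_self]
    rw [ih hp]
    by_cases hd : c = '-'
    · simp [pvFix, hd]
    · by_cases hg : c = '>'
      · simp [pvFix, hg]
      · simp [pvFix, hd, hg]

-- find of a single character: either absent, or it splits the list at the first occurrence
lemma pvFind_none (cs : List Char) (a : Char) (h : PySem.Chars.find cs [a] = -1) : a ∉ cs := by
  intro hm
  have hinf : [a] <:+: cs := by
    obtain ⟨p, s, rfl⟩ := List.append_of_mem hm
    exact ⟨p, s, by simp⟩
  exact (PySem.Chars.find_eq_neg_one_iff cs [a]).1 h hinf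

lemma pvFind_decomp (cs : List Char) (a : Char) (h : PySem.Chars.find cs [a] ≠ -1) :
    (PySem.Chars.find cs [a]).toNat < cs.length ∧
    cs = cs.take (PySem.Chars.find cs [a]).toNat ++ a :: cs.drop ((PySem.Chars.find cs [a]).toNat + 1) ∧
    a ∉ cs.take (PySem.Chars.find cs [a]).toNat := by
  have h0 : (0:Int) ≤ PySem.Chars.find cs [a] := by
    have := PySem.Chars.neg_one_le_find cs [a]; omega
  obtain ⟨hpre, hmin⟩ := PySem.Chars.find_spec h0
  set n := (PySem.Chars.find cs [a]).toNat with hn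
  obtain ⟨t, ht⟩ := hpre
  have hlt : n < cs.length := by
    have h1 : (cs.drop n).length = t.length + 1 := by rw [← ht]; simp
    simp only [List.length_drop] at h1; omega
  have hget : cs.drop n = a :: cs.drop (n + 1) := by
    have hdd : cs.drop (n + 1) = (cs.drop n).drop 1 := by
      rw [List.drop_drop]
    rw [hdd, ← ht]
    simp
  refine ⟨hlt, ?_, ?_⟩
  · conv_lhs => rw [← List.take_append_drop n cs]
    rw [hget]
  · intro hm
    obtain ⟨k, hk, hks⟩ := List.getElem_of_mem hm
    have hk' : k < n := by
      have := List.length_take_le n cs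
      simp only [List.length_take] at hk
      omega
    apply hmin k hk'
    rw [List.getElem_take] at hks
    have hdk : cs.drop k = a :: cs.drop (k + 1) := by
      rw [List.drop_eq_getElem_cons (by omega)]
      rw [hks]
    exact ⟨cs.drop (k + 1), by rw [hdk]; rfl⟩

-- main invariant of Source B's loop
lemma pvAltGo_flatten : ∀ (n : Nat) (rest : List Char), rest.length < n → ∀ (acc : List (List Char)),
    (pvAltGo n acc rest).flatten = acc.flatten ++ pvProc false rest := by
  intro n
  induction n with
  | zero =>
    intro rest hlen acc
    omega
  | succ n ih =>
    intro rest hlen acc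
    simp only [pvAltGo]
    by_cases hi : PySem.Chars.find rest ['('] = -1
    · rw [if_pos hi]
      have hid : pvProc false rest = rest := by
        have := pvProc_false_append rest [] (pvFind_none rest '(' hi)
        simpa [pvProc] using this
      simp [hid]
    · rw [if_neg hi]
      obtain ⟨hlt, hdec, hnot⟩ := pvFind_decomp rest '(' hi
      have h0 : (0:Int) ≤ PySem.Chars.find rest ['('] := by
        have := PySem.Chars.neg_one_le_find rest ['(']; omega
      set i := PySem.Chars.find rest ['('] with hidef
      have hslto : PySem.List.slice rest none (some (i + 1)) = rest.take (i.toNat + 1) := by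
        rw [PySem.List.slice_to rest (by omega)]
        congr 1; omega
      have hslfrom : PySem.List.slice rest (some (i + 1)) none = rest.drop (i.toNat + 1) := by
        rw [PySem.List.slice_from rest (by omega)]
        congr 1; omega
      have htake : rest.take (i.toNat + 1) = rest.take i.toNat ++ ['('] := by
        conv_lhs => rw [hdec]
        rw [List.take_append]
        simp [List.length_take, Nat.min_eq_left (le_of_lt hlt)]
      have hproc : pvProc false rest = rest.take i.toNat ++ '(' :: pvProc true (rest.drop (i.toNat + 1)) := by
        conv_lhs => rw [hdec]
        rw [pvProc_false_append _ _ hnot]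
        congr 1
      rw [hslto, hslfrom]
      set rest1 := rest.drop (i.toNat + 1) with hr1
      by_cases hj : PySem.Chars.find rest1 [')'] = -1
      · rw [if_pos hj]
        have hfix : pvProc true rest1 = pvFix rest1 := by
          have := pvProc_true_append rest1 [] (pvFind_none rest1 ')' hj)
          simpa [pvProc] using this
        simp [hproc, htake, hfix]
      · rw [if_neg hj]
        obtain ⟨hlt2, hdec2, hnot2⟩ := pvFind_decomp rest1 ')' hj
        have h02 : (0:Int) ≤ PySem.Chars.find rest1 [')'] := by
          have := PySem.Chars.neg_one_le_find rest1 [')']; omega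
        set j := PySem.Chars.find rest1 [')'] with hjdef
        have hsl2to : PySem.List.slice rest1 none (some j) = rest1.take j.toNat := by
          rw [PySem.List.slice_to rest1 h02]
        have hsl2from : PySem.List.slice rest1 (some (j + 1)) none = rest1.drop (j.toNat + 1) := by
          rw [PySem.List.slice_from rest1 (by omega)]
          congr 1; omega
        rw [hsl2to, hsl2from]
        have hlen2 : (rest1.drop (j.toNat + 1)).length < n := by
          simp only [hr1, List.length_drop]
          omega
        rw [ih _ hlen2]
        have hproc2 : pvProc true rest1 =
            pvFix (rest1.take j.toNat) ++ ')' :: pvProc false (rest1.drop (j.toNat + 1)) := by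
          conv_lhs => rw [hdec2]
          rw [pvProc_true_append _ _ hnot2]
          congr 1
        simp [hproc, htake, hproc2]

-- ===== VERDICT (by name: the statement is the Claim_ definition above) =====
theorem replaceArrowWithinParenthesis_spec : Claim_equal_replaceArrowWithinParenthesis := by
  intro text _
  simp only [Spec_replaceArrowWithinParenthesis, replaceArrowWithinParenthesis,
    replaceArrowWithinParenthesis_alt]
  rw [pvFoldA, pvJoinNil, pvAltGo_flatten (text.toList.length + 1) text.toList (Nat.lt_succ_self _) []]
  simp
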